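-- pv_equiv track=rewrite | github.com/jetaimy/CV | Image_caption_ocr_latex/text_detection/text_detection_faster_rcnn/character_split_traditional/charactor_split_traditional.py | extract_peek_ranges_from_array
-- ===== SOURCE A (Python) =====
-- def extract_peek_ranges_from_array(array_vals, minimun_val=100, minimun_range=30):
--     start_i = None
--     end_i = None
--     peek_ranges = []
--     for i, val in enumerate(array_vals):
--         if val > minimun_val and start_i is None:
--             start_i = i
--         elif val > minimun_val and start_i is not None:
--             pass
--         elif val < minimun_val and start_i is not None:
--             end_i = i
--             if end_i - start_i >= minimun_range:
--                 peek_ranges.append((start_i, end_i))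
--             start_i = None
--             end_i = None
--         elif val < minimun_val and start_i is None:
--             pass
--         else:
--             raise ValueError("cannot parse this case...")
--     return peek_ranges
-- ===== SOURCE B (Python) =====
-- def extract_peek_ranges_from_array(array_vals, minimun_val=100, minimun_range=30):
--     # Two-phase run-based version: build maximal homogeneous runs first,
--     # then select the long-enough above-threshold runs; runs[:-1] drops an
--     # unclosed trailing run, like the original state machine does.
--     n = len(array_vals)
--     runs = []  # (above, start, end)
--     i = 0
--     while i < n:
--         v = array_vals[i]
--         if v == minimun_val:
--             raise ValueError("cannot parse this case...")
--         above = v > minimun_val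
--         j = i + 1
--         while j < n and array_vals[j] != minimun_val and (array_vals[j] > minimun_val) == above:
--             j += 1
--         runs.append((above, i, j))
--         i = j
--     return [(s, e) for (above, s, e) in runs[:-1] if above and e - s >= minimun_range]
-- ===== Notes on version B (the rewrite author's own statement) =====
-- stated objective: alternative
-- what changed: Replaces the element-by-element state machine (start_i/end_i bookkeeping) with a two-phase run decomposition: first build the maximal runs of consecutive above/below-threshold values, then select the above-threshold runs of sufficient length from runs[:-1], which drops an unclosed trailing run.
import Mathlib
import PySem

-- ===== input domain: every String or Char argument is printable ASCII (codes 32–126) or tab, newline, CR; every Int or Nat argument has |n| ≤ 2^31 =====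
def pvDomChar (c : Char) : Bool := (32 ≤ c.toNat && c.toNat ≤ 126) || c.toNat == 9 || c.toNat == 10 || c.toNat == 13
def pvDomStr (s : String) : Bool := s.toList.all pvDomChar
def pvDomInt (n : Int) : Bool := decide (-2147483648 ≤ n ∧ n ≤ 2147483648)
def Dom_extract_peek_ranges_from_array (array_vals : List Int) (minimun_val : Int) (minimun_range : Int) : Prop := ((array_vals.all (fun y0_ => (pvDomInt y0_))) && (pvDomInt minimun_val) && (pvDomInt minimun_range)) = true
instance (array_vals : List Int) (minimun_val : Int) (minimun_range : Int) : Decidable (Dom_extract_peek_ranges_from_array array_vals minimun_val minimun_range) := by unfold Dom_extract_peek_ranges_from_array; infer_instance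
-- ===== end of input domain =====

-- B replaces A's element-by-element state machine with a two-phase run decomposition
-- (build maximal runs, then select from runs[:-1]); same cost, different structure.

-- ===== PORT A =====
-- A's for-loop as structural recursion over the list, carrying the index i and
-- the state (start_i, peek_ranges); `none` result = the ValueError branch.
def pvALoop (mv mr : Int) : List Int → Int → Option Int → List (Int × Int) → Option (List (Int × Int))
  | [], _, _, peek_ranges => some peek_ranges
  | val :: rest, i, start_i, peek_ranges =>
    if val > mv ∧ start_i = none then
      pvALoop mv mr rest (i + 1) (some i) peek_ranges
    else if val > mv ∧ start_i ≠ none then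
      pvALoop mv mr rest (i + 1) start_i peek_ranges
    else if val < mv ∧ start_i ≠ none then
      pvALoop mv mr rest (i + 1) none
        (if i - start_i.getD 0 ≥ mr then peek_ranges ++ [(start_i.getD 0, i)] else peek_ranges)
    else if val < mv ∧ start_i = none then
      pvALoop mv mr rest (i + 1) none peek_ranges
    else
      none

def extract_peek_ranges_from_array (array_vals : List Int) (minimun_val : Int) (minimun_range : Int) : List (Int × Int) :=
  (pvALoop minimun_val minimun_range array_vals 0 none []).getD []

-- ===== PORT B =====
-- B's inner while-loop: consume the rest of a run with key `above`, returning
-- the end index j and the unconsumed suffix.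
def pvTakeRun (mv : Int) (above : Bool) : List Int → Int → Int × List Int
  | [], j => (j, [])
  | v :: rest, j =>
    if v ≠ mv ∧ decide (v > mv) = above then pvTakeRun mv above rest (j + 1)
    else (j, v :: rest)

theorem pvTakeRun_len (mv : Int) (above : Bool) : ∀ (xs : List Int) (j : Int), ((pvTakeRun mv above xs j).2).length ≤ xs.length := by
  intro xs
  induction xs with
  | nil => intro j; simp [pvTakeRun]
  | cons v rest ih =>
    intro j
    simp only [pvTakeRun]
    split
    · exact le_trans (ih (j + 1)) (Nat.le_succ _)
    · simp

-- B's outer while-loop: the list of maximal runs (above?, start, end);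
-- `none` = the ValueError raised when a value equals mv.
def pvBuildRuns (mv : Int) : List Int → Int → Option (List (Bool × Int × Int))
  | [], _ => some []
  | v :: rest, i =>
    if v = mv then none
    else
      let above := decide (v > mv)
      let p := pvTakeRun mv above rest (i + 1)
      match pvBuildRuns mv p.2 p.1 with
      | none => none
      | some rs => some ((above, i, p.1) :: rs)
termination_by xs => xs.length
decreasing_by
  exact Nat.lt_succ_of_le (pvTakeRun_len mv (decide (v > mv)) rest (i + 1))

-- B's final comprehension over runs[:-1]
def pvSel (mr : Int) (runs : List (Bool × Int × Int)) : List (Int × Int) :=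
  runs.dropLast.filterMap (fun r => if r.1 = true ∧ r.2.2 - r.2.1 ≥ mr then some (r.2.1, r.2.2) else none)

def extract_peek_ranges_from_array_alt (array_vals : List Int) (minimun_val : Int) (minimun_range : Int) : List (Int × Int) :=
  match pvBuildRuns minimun_val array_vals 0 with
  | none => []
  | some runs => pvSel minimun_range runs

-- ===== PRECONDITION & SPEC =====
-- Pre_ excludes exactly the inputs where A raises ValueError: some element equal
-- to minimun_val (no comparison branch applies); B raises there too.
def Pre_extract_peek_ranges_from_array (array_vals : List Int) (minimun_val : Int) (minimun_range : Int) : Prop :=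
  minimun_val ∉ array_vals

instance (array_vals : List Int) (minimun_val : Int) (minimun_range : Int) : Decidable (Pre_extract_peek_ranges_from_array array_vals minimun_val minimun_range) := by unfold Pre_extract_peek_ranges_from_array; infer_instance

def pvWitness_extract_peek_ranges_from_array : List Int × Int × Int := ([101, 101, 101, 0], 100, 2)

def Spec_extract_peek_ranges_from_array (array_vals : List Int) (minimun_val : Int) (minimun_range : Int) (out : List (Int × Int)) : Prop := out = extract_peek_ranges_from_array_alt array_vals minimun_val minimun_range
instance (array_vals : List Int) (minimun_val : Int) (minimun_range : Int) (out : List (Int × Int)) : Decidable (Spec_extract_peek_ranges_from_array array_vals minimun_val minimun_range out) := by unfold Spec_extract_peek_ranges_from_array; infer_instance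

-- ===== CLAIM (what is proved, stated in full; the proofs are below) =====
def Claim_equal_extract_peek_ranges_from_array : Prop := ∀ (array_vals : List Int) (minimun_val : Int) (minimun_range : Int), Dom_extract_peek_ranges_from_array array_vals minimun_val minimun_range → Pre_extract_peek_ranges_from_array array_vals minimun_val minimun_range → Spec_extract_peek_ranges_from_array array_vals minimun_val minimun_range (extract_peek_ranges_from_array array_vals minimun_val minimun_range)

-- ===== LEMMAS AND PROOFS =====

theorem pvTakeRun_decomp (mv : Int) (above : Bool) : ∀ (xs : List Int) (j : Int),
    ∃ blk : List Int,
      xs = blk ++ (pvTakeRun mv above xs j).2 ∧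
      (pvTakeRun mv above xs j).1 = j + blk.length ∧
      (∀ v ∈ blk, v ≠ mv ∧ decide (v > mv) = above) ∧
      (∀ w t, (pvTakeRun mv above xs j).2 = w :: t → ¬(w ≠ mv ∧ decide (w > mv) = above)) := by
  intro xs
  induction xs with
  | nil => intro j; exact ⟨[], by simp [pvTakeRun]⟩
  | cons v rest ih =>
    intro j
    by_cases h : v ≠ mv ∧ decide (v > mv) = above
    · obtain ⟨blk, h1, h2, h3, h4⟩ := ih (j + 1)
      refine ⟨v :: blk, ?_, ?_, ?_, ?_⟩
      · simpa [pvTakeRun, if_pos h] using congrArg (v :: ·) h1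
      · simp only [pvTakeRun, if_pos h, h2, List.length_cons]
        push_cast; ring
      · intro w hw
        rcases List.mem_cons.mp hw with rfl | hw
        · exact h
        · exact h3 w hw
      · intro w t hw
        simp only [pvTakeRun, if_pos h] at hw
        exact h4 w t hw
    · refine ⟨[], by simp [pvTakeRun, if_neg h], by simp [pvTakeRun, if_neg h], by simp, ?_⟩
      intro w t hw
      simp only [pvTakeRun, if_neg h] at hw
      obtain ⟨rfl, -⟩ := hw
      exact h

theorem pvALoop_low (mv mr : Int) : ∀ (blk : List Int), (∀ v ∈ blk, v < mv) → ∀ (ys : List Int) (i : Int) (peek : List (Int × Int)),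
    pvALoop mv mr (blk ++ ys) i none peek = pvALoop mv mr ys (i + blk.length) none peek := by
  intro blk
  induction blk with
  | nil => intro _ ys i peek; simp
  | cons v bs ih =>
    intro h ys i peek
    have hv : v < mv := h v (by simp)
    have step : pvALoop mv mr ((v :: bs) ++ ys) i none peek = pvALoop mv mr (bs ++ ys) (i + 1) none peek := by
      have hng : ¬ v > mv := by omega
      simp only [List.cons_append, pvALoop]
      simp [hng, hv]
    rw [step, ih (fun w hw => h w (by simp [hw])) ys (i + 1) peek]
    congr 1
    simp only [List.length_cons]
    push_cast; ring

theorem pvALoop_high (mv mr : Int) : ∀ (blk : List Int), (∀ v ∈ blk, v > mv) → ∀ (ys : List Int) (i s : Int) (peek : List (Int × Int)),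
    pvALoop mv mr (blk ++ ys) i (some s) peek = pvALoop mv mr ys (i + blk.length) (some s) peek := by
  intro blk
  induction blk with
  | nil => intro _ ys i s peek; simp
  | cons v bs ih =>
    intro h ys i s peek
    have hv : v > mv := h v (by simp)
    have step : pvALoop mv mr ((v :: bs) ++ ys) i (some s) peek = pvALoop mv mr (bs ++ ys) (i + 1) (some s) peek := by
      simp only [List.cons_append, pvALoop]
      simp [hv]
    rw [step, ih (fun w hw => h w (by simp [hw])) ys (i + 1) s peek]
    congr 1
    simp only [List.length_cons]
    push_cast; ring

theorem pvSel_singleton (mr : Int) (r : Bool × Int × Int) : pvSel mr [r] = [] := rfl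

theorem pvSel_cons_cons (mr : Int) (a b : Bool × Int × Int) (rs : List (Bool × Int × Int)) :
    pvSel mr (a :: b :: rs) = (if a.1 = true ∧ a.2.2 - a.2.1 ≥ mr then [(a.2.1, a.2.2)] else []) ++ pvSel mr (b :: rs) := by
  by_cases h : a.1 = true ∧ a.2.2 - a.2.1 ≥ mr
  · simp [pvSel, List.dropLast_cons₂, h]
  · simp [pvSel, List.dropLast_cons₂, h]

theorem pvSel_false_cons (mr : Int) (r : Bool × Int × Int) (rs : List (Bool × Int × Int)) (h : r.1 = false) :
    pvSel mr (r :: rs) = pvSel mr rs := by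
  cases rs with
  | nil => simp [pvSel]
  | cons b rs' => rw [pvSel_cons_cons]; simp [h]

theorem pv_main (mv mr : Int) : ∀ (n : Nat) (xs : List Int) (i : Int) (peek : List (Int × Int)),
    xs.length ≤ n → mv ∉ xs →
    ∃ rs, pvBuildRuns mv xs i = some rs ∧
      pvALoop mv mr xs i none peek = some (peek ++ pvSel mr rs) := by
  intro n
  induction n with
  | zero =>
    intro xs i peek hlen _
    have hx : xs = [] := List.eq_nil_of_length_eq_zero (Nat.le_zero.mp hlen)
    subst hx
    exact ⟨[], by simp [pvBuildRuns], by simp [pvALoop, pvSel]⟩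
  | succ n ih =>
    intro xs i peek hlen hmem
    match xs with
    | [] => exact ⟨[], by simp [pvBuildRuns], by simp [pvALoop, pvSel]⟩
    | v :: rest =>
      have hvne : v ≠ mv := fun h => hmem (h ▸ List.mem_cons_self)
      have hmemr : mv ∉ rest := fun h => hmem (List.mem_cons_of_mem _ h)
      have hlenr : rest.length ≤ n := by simpa using hlen
      rcases lt_or_gt_of_ne hvne with hvlt | hvgt
      · -- v < mv : a below-threshold run starts here
        have hdec : decide (v > mv) = false := by simp; omega
        obtain ⟨blk, hb1, hb2, hb3, hb4⟩ := pvTakeRun_decomp mv false rest (i + 1)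
        set p := pvTakeRun mv false rest (i + 1) with hp
        have hblklt : ∀ w ∈ blk, w < mv := by
          intro w hw
          obtain ⟨hne, hd⟩ := hb3 w hw
          have : ¬ w > mv := by simpa using hd
          omega
        have hmemp : mv ∉ p.2 := fun h => hmemr (hb1 ▸ List.mem_append_right _ h)
        have hlenp : p.2.length ≤ n := by
          have := congrArg List.length hb1
          simp at this
          omega
        obtain ⟨rs', hr1, hr2⟩ := ih p.2 p.1 peek hlenp hmemp
        refine ⟨(false, i, p.1) :: rs', ?_, ?_⟩
        · simp only [pvBuildRuns, if_neg (by exact hvne : ¬ v = mv)]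
          simp only [hdec, ← hp, hr1]
        · have step : pvALoop mv mr (v :: rest) i none peek = pvALoop mv mr rest (i + 1) none peek := by
            have hng : ¬ v > mv := by omega
            simp only [pvALoop]
            simp [hng, hvlt]
          rw [step, hb1, pvALoop_low mv mr blk hblklt p.2 (i + 1) peek, ← hb2, hr2,
            pvSel_false_cons mr (false, i, p.1) rs' rfl]
      · -- v > mv : an above-threshold run starts here
        have hdec : decide (v > mv) = true := by simpa using hvgt
        obtain ⟨blk, hb1, hb2, hb3, hb4⟩ := pvTakeRun_decomp mv true rest (i + 1)
        set p := pvTakeRun mv true rest (i + 1) with hp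
        have hblkgt : ∀ w ∈ blk, w > mv := by
          intro w hw
          obtain ⟨hne, hd⟩ := hb3 w hw
          simpa using hd
        have hmemp : mv ∉ p.2 := fun h => hmemr (hb1 ▸ List.mem_append_right _ h)
        have hlenp : p.2.length ≤ n := by
          have := congrArg List.length hb1
          simp at this
          omega
        have step : pvALoop mv mr (v :: rest) i none peek = pvALoop mv mr rest (i + 1) (some i) peek := by
          simp only [pvALoop]
          simp [hvgt]
        have reach : pvALoop mv mr (v :: rest) i none peek = pvALoop mv mr p.2 p.1 (some i) peek := by
          rw [step, hb1, pvALoop_high mv mr blk hblkgt p.2 (i + 1) i peek, ← hb2]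
        match hsuf : p.2 with
        | [] =>
          refine ⟨[(true, i, p.1)], ?_, ?_⟩
          · simp only [pvBuildRuns, if_neg (by exact hvne : ¬ v = mv)]
            simp only [hdec, ← hp, hsuf, pvBuildRuns]
          · rw [reach, hsuf]
            simp [pvALoop, pvSel_singleton]
        | w :: t =>
          have hwne : w ≠ mv := by
            intro h
            exact (hsuf ▸ hmemp) (h ▸ List.mem_cons_self)
          have hwlt : w < mv := by
            have hnot := hb4 w t hsuf
            have : ¬ w > mv := by
              intro hgt
              exact hnot ⟨hwne, by simpa using hgt⟩
            omega
          -- close the pending range at index p.1, then continue below-threshold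
          have step2 : pvALoop mv mr (w :: t) p.1 (some i) peek =
              pvALoop mv mr t (p.1 + 1) none (if p.1 - i ≥ mr then peek ++ [(i, p.1)] else peek) := by
            have hng : ¬ w > mv := by omega
            simp only [pvALoop]
            simp [hng, hwlt]
          have hwdec : decide (w > mv) = false := by simp; omega
          obtain ⟨blk', hc1, hc2, hc3, hc4⟩ := pvTakeRun_decomp mv false t (p.1 + 1)
          set q := pvTakeRun mv false t (p.1 + 1) with hq
          have hblklt' : ∀ u ∈ blk', u < mv := by
            intro u hu
            obtain ⟨hne, hd⟩ := hc3 u hu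
            have : ¬ u > mv := by simpa using hd
            omega
          have hmemt : mv ∉ t := fun h => (hsuf ▸ hmemp) (List.mem_cons_of_mem _ h)
          have hmemq : mv ∉ q.2 := fun h => hmemt (hc1 ▸ List.mem_append_right _ h)
          have hlenq : q.2.length ≤ n := by
            have e1 := congrArg List.length hb1
            have e2 := congrArg List.length hc1
            rw [hsuf] at e1
            simp at e1 e2
            omega
          set peek' := (if p.1 - i ≥ mr then peek ++ [(i, p.1)] else peek) with hpeek'
          obtain ⟨rs'', hr1, hr2⟩ := ih q.2 q.1 peek' hlenq hmemq
          refine ⟨(true, i, p.1) :: (false, p.1, q.1) :: rs'', ?_, ?_⟩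
          · have hinner : pvBuildRuns mv p.2 p.1 = some ((false, p.1, q.1) :: rs'') := by
              rw [hsuf]
              simp only [pvBuildRuns, if_neg (by exact hwne : ¬ w = mv)]
              simp only [hwdec, ← hq, hr1]
            simp only [pvBuildRuns, if_neg (by exact hvne : ¬ v = mv)]
            simp only [hdec, ← hp, hinner]
          · rw [reach, hsuf, step2, hc1,
              pvALoop_low mv mr blk' hblklt' q.2 (p.1 + 1) peek', ← hc2, hr2]
            rw [pvSel_cons_cons, pvSel_false_cons mr (false, p.1, q.1) rs'' rfl]
            congr 1
            rw [hpeek']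
            by_cases hcond : p.1 - i ≥ mr
            · rw [if_pos hcond, if_pos ⟨rfl, hcond⟩]
              simp
            · rw [if_neg hcond, if_neg (fun ⟨_, hc⟩ => hcond hc)]
              simp

-- ===== VERDICT (by name: the statement is the Claim_ definition above) =====
theorem extract_peek_ranges_from_array_spec : Claim_equal_extract_peek_ranges_from_array := by
  intro array_vals minimun_val minimun_range _ hpre
  unfold Spec_extract_peek_ranges_from_array
  obtain ⟨rs, h1, h2⟩ := pv_main minimun_val minimun_range array_vals.length array_vals 0 [] le_rfl hpre
  unfold extract_peek_ranges_from_array extract_peek_ranges_from_array_alt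
  rw [h1, h2]
  simp
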